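-- pv_equiv track=rewrite | github.com/medmax33/Survivor | level26.py | white_walkers
-- ===== SOURCE A (Python) =====
-- def white_walkers(village: str) -> bool:
--     ind = []
--
--     for i in range(len(village)):
--         if '1' <= village[i] <= '9':
--             ind.append(i)
--     if len(ind) < 2:
--         return False
--
--     for i in range(len(ind) - 1):
--         if int(village[ind[i]]) + int(village[ind[i + 1]]) == 10 and village[ind[i]:ind[i + 1] + 1].count('=') != 3:
--             return False
--     return True
-- ===== SOURCE B (Python) =====
-- def white_walkers(village: str) -> bool:
--     prev = None          # value of the last nonzero digit seen, or None
--     eq = 0               # number of '=' seen since that digit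
--     digits = 0           # number of nonzero digits seen
--     ok = True
--     for c in village:
--         if '1' <= c <= '9':
--             d = ord(c) - 48
--             if prev is not None and prev + d == 10 and eq != 3:
--                 ok = False
--             prev = d
--             eq = 0
--             digits += 1
--         elif c == '=':
--             eq += 1
--     return ok and digits >= 2
-- ===== Notes on version B (the rewrite author's own statement) =====
-- stated objective: alternative
-- what changed: Replaced the two-pass index-list algorithm (collect digit positions, then re-slice the string for each adjacent pair and count '=') with a single streaming scan keeping the previous digit, a running '='-counter reset at each digit, and a digit counter.
import Mathlib
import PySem

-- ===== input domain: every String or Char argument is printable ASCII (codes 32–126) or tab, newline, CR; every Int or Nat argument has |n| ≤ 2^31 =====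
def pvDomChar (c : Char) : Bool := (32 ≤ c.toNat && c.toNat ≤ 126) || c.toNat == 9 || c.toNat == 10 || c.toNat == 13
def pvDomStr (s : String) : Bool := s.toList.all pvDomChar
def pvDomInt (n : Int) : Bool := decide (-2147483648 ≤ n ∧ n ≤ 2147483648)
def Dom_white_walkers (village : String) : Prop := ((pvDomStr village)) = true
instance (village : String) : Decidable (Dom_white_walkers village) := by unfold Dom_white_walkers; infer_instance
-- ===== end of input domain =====

-- B replaces A's two-pass index-list-and-slice algorithm by one streaming scan with accumulators (alternative decomposition, same cost).

-- ===== PORT A =====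
-- first loop: for i in range(len(village)): if '1' <= village[i] <= '9': ind.append(i)
-- (structural recursion over the characters, carrying the running index i)
def wwInd (cs : List Char) (i : Int) : List Int :=
  match cs with
  | [] => []
  | c :: r => if '1' ≤ c ∧ c ≤ '9' then i :: wwInd r (i + 1) else wwInd r (i + 1)

-- int(village[i]); exact for the digit characters '1'..'9' this is applied to
def wwVal (cs : List Char) (i : Int) : Int :=
  ((((PySem.List.pyGet? cs i).getD '0').toNat : Int) - 48)

-- second loop with its early return: for i in range(len(ind)-1): …
def wwCheck (cs : List Char) : List Int → Bool
  | i :: j :: rest =>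
      if wwVal cs i + wwVal cs j = 10 ∧
          ((PySem.List.slice cs (some i) (some (j + 1))).count '=' : Int) ≠ 3 then false
      else wwCheck cs (j :: rest)
  | _ => true

def white_walkers (village : String) : Bool :=
  let cs := village.toList
  let ind := wwInd cs 0
  if ind.length < 2 then false else wwCheck cs ind

-- ===== PORT B =====
-- state: (prev digit or none, '='-count since last digit, digit count, ok)
def wwStep (s : Option Int × Int × Int × Bool) (c : Char) : Option Int × Int × Int × Bool :=
  let (prev, eq, digits, ok) := s
  if '1' ≤ c ∧ c ≤ '9' then
    let d : Int := (c.toNat : Int) - 48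
    let ok' := if (match prev with
                   | some p => decide (p + d = 10) && decide (eq ≠ 3)
                   | none => false) then false else ok
    (some d, 0, digits + 1, ok')
  else if c = '=' then (prev, eq + 1, digits, ok)
  else (prev, eq, digits, ok)

def white_walkers_alt (village : String) : Bool :=
  let st := village.toList.foldl wwStep (none, 0, 0, true)
  st.2.2.2 && decide (2 ≤ st.2.2.1)

-- ===== PRECONDITION & SPEC =====
def Spec_white_walkers (village : String) (out : Bool) : Prop := out = white_walkers_alt village
instance (village : String) (out : Bool) : Decidable (Spec_white_walkers village out) := by unfold Spec_white_walkers; infer_instance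

-- ===== CLAIM (what is proved, stated in full; the proofs are below) =====
def Claim_equal_white_walkers : Prop := ∀ (village : String), Dom_white_walkers village → Spec_white_walkers village (white_walkers village)

-- ===== LEMMAS AND PROOFS =====

-- reference "ok" accumulator: what B's fold computes in its Bool component
def okGo : Option Int → Int → List Char → Bool
  | _, _, [] => true
  | p, e, c :: r =>
      if '1' ≤ c ∧ c ≤ '9' then
        (!(match p with
           | some q => decide (q + ((c.toNat : Int) - 48) = 10) && decide (e ≠ 3)
           | none => false)) && okGo (some ((c.toNat : Int) - 48)) 0 r
      else okGo p (e + if c = '=' then 1 else 0) r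

def digCnt (cs : List Char) : Int := (cs.countP (fun c => decide ('1' ≤ c ∧ c ≤ '9')) : Int)

theorem digCnt_cons (c : Char) (r : List Char) :
    digCnt (c :: r) = digCnt r + (if '1' ≤ c ∧ c ≤ '9' then 1 else 0) := by
  by_cases h : '1' ≤ c ∧ c ≤ '9' <;> simp [digCnt, h]

theorem fold_ok (cs : List Char) : ∀ (p : Option Int) (e n : Int) (b : Bool),
    (cs.foldl wwStep (p, e, n, b)).2.2.2 = (b && okGo p e cs) := by
  induction cs with
  | nil => intro p e n b; simp [okGo]
  | cons c r ih =>
      intro p e n b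
      simp only [List.foldl_cons, wwStep, okGo]
      split_ifs with h1 h2
      · simp only [] at *
        rw [ih]
        simp_all
      · simp only [Bool.not_eq_true] at h2
        rw [ih, h2]
        simp
      · rw [ih]
      · rw [ih]; norm_num

theorem fold_cnt (cs : List Char) : ∀ (p : Option Int) (e n : Int) (b : Bool),
    (cs.foldl wwStep (p, e, n, b)).2.2.1 = n + digCnt cs := by
  induction cs with
  | nil => intro p e n b; simp [digCnt]
  | cons c r ih =>
      intro p e n b
      simp only [List.foldl_cons, wwStep]
      split_ifs with h1 h2 <;> rw [ih, digCnt_cons] <;> simp [h1] <;> ring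

theorem wwInd_len (cs : List Char) : ∀ (i : Int), ((wwInd cs i).length : Int) = digCnt cs := by
  induction cs with
  | nil => intro i; simp [wwInd, digCnt]
  | cons c r ih =>
      intro i
      simp only [wwInd]
      split_ifs with h <;> rw [digCnt_cons] <;> simp [h] <;> rw [← ih (i+1)] <;> push_cast <;> ring

-- the between-digits '=' count for positions p+1 .. k-1 of the full list
def eqCnt (full : List Char) (p k : Nat) : Nat :=
  (((full.drop (p + 1)).take (k - (p + 1))).count '=')

theorem wwVal_at (full : List Char) (p : Nat) (h : p < full.length) :
    wwVal full (p : Int) = ((full[p].toNat : Int) - 48) := by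
  simp [wwVal, PySem.List.pyGet?_natCast, List.getElem?_eq_getElem h]

theorem slice_count (full : List Char) (p k : Nat) (hpk : p < k) (hk : k < full.length)
    (hp : '1' ≤ full[p] ∧ full[p] ≤ '9') (hkd : '1' ≤ full[k]'hk ∧ full[k]'hk ≤ '9') :
    (PySem.List.slice full (some (p : Int)) (some ((k : Int) + 1))).count '=' = eqCnt full p k := by
  have hcast : ((k : Int) + 1) = ((k + 1 : Nat) : Int) := by push_cast; ring
  rw [hcast, PySem.List.slice_natCast]
  have hp' : p < full.length := Nat.lt_trans hpk hk
  have h1 : full.drop p = full[p] :: full.drop (p + 1) := List.drop_eq_getElem_cons hp'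
  have h2 : k + 1 - p = (k - (p + 1)) + 2 := by omega
  rw [h1, h2]
  simp only [List.take_succ_cons]
  have h3 : (k - (p+1)) + 1 = k - p := by omega
  have h4 : (full.drop (p+1)).take ((k - (p+1)) + 1)
      = (full.drop (p+1)).take (k - (p+1)) ++ ((full.drop (p+1))[k - (p+1)]?).toList := List.take_succ
  have h5 : (full.drop (p+1))[k - (p+1)]? = some (full[k]'hk) := by
    rw [List.getElem?_drop]
    have : p + 1 + (k - (p+1)) = k := by omega
    rw [this, List.getElem?_eq_getElem hk]
  rw [h4, h5]
  have hpne : full[p] ≠ '=' := by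
    intro hc; rw [hc] at hp; exact absurd hp (by decide)
  have hkne : full[k]'hk ≠ '=' := by
    intro hc; rw [hc] at hkd; exact absurd hkd (by decide)
  simp [List.count_append, hpne, hkne, eqCnt]

theorem main_lemma (full : List Char) : ∀ (r : List Char) (k p : Nat),
    full.drop k = r → p < k →
    (hp : p < full.length) → ('1' ≤ full[p] ∧ full[p] ≤ '9') →
    wwCheck full ((p : Int) :: wwInd r (k : Int))
      = okGo (some ((full[p].toNat : Int) - 48)) ((eqCnt full p k : Nat) : Int) r := by
  intro r
  induction r with
  | nil => intro k p _ _ _ _; simp [wwInd, wwCheck, okGo]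
  | cons c r' ih =>
      intro k p hdrop hpk hp hpd
      have hk : k < full.length := by
        by_contra hc
        rw [List.drop_eq_nil_of_le (by omega)] at hdrop
        exact absurd hdrop (by simp)
      have hck : full[k]'hk = c := by
        have := List.drop_eq_getElem_cons hk
        rw [hdrop] at this
        exact (List.cons.injEq _ _ _ _ ▸ this).1.symm
      have hdrop' : full.drop (k + 1) = r' := by
        have h := congrArg (List.drop 1) hdrop
        rw [List.drop_drop] at h
        simpa [Nat.add_comm] using h
      by_cases hcd : '1' ≤ c ∧ c ≤ '9'
      · -- digit: the pair (p, k) is checked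
        simp only [wwInd, if_pos hcd, wwCheck, okGo]
        rw [wwVal_at full p (by omega), wwVal_at full k hk, hck]
        rw [slice_count full p k hpk hk hpd (hck ▸ hcd)]
        by_cases hbad : ((full[p].toNat : Int) - 48) + ((c.toNat : Int) - 48) = 10 ∧ ((eqCnt full p k : Nat) : Int) ≠ 3
        · rw [if_pos hbad]
          have : (decide (((full[p].toNat : Int) - 48) + ((c.toNat : Int) - 48) = 10) &&
                  decide (((eqCnt full p k : Nat) : Int) ≠ 3)) = true := by
            simp [hbad.1, hbad.2]
          rw [this]; simp
        · rw [if_neg hbad]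
          have hkad : ('1':Char) ≤ full[k]'hk ∧ full[k]'hk ≤ '9' := hck ▸ hcd
          have hchn : ((k : Int) + 1) = ((k + 1 : Nat) : Int) := by push_cast; ring
          have hrec := ih (k + 1) k hdrop' (by omega) hk hkad
          rw [hchn, hrec, hck]
          have he0 : eqCnt full k (k + 1) = 0 := by simp [eqCnt]
          rw [he0]
          have : (decide (((full[p].toNat : Int) - 48) + ((c.toNat : Int) - 48) = 10) &&
                  decide (((eqCnt full p k : Nat) : Int) ≠ 3)) = false := by
            rcases not_and_or.mp hbad with h | h <;> simp [h] at * <;> simp_all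
          rw [this]
          simp
      · -- not a digit
        simp only [wwInd, if_neg hcd, okGo]
        have hchn : ((k : Int) + 1) = ((k + 1 : Nat) : Int) := by push_cast; ring
        have hrec := ih (k + 1) p hdrop' (by omega) hp hpd
        rw [hchn, hrec]
        have : eqCnt full p (k + 1) = eqCnt full p k + (if c = '=' then 1 else 0) := by
          unfold eqCnt
          have h2 : k + 1 - (p+1) = (k - (p+1)) + 1 := by omega
          rw [h2, List.take_succ]
          have h5 : (full.drop (p+1))[k - (p+1)]? = some c := by
            rw [List.getElem?_drop]
            have : p + 1 + (k - (p+1)) = k := by omega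
            rw [this, List.getElem?_eq_getElem hk, hck]
          rw [h5]
          split_ifs with hce <;> simp [List.count_append, hce]
        rw [this]
        split_ifs with hce <;> push_cast <;> ring_nf

theorem main0 (full : List Char) : ∀ (r : List Char) (k : Nat) (e : Int),
    full.drop k = r → wwCheck full (wwInd r (k : Int)) = okGo none e r := by
  intro r
  induction r with
  | nil => intro k e _; simp [wwInd, wwCheck, okGo]
  | cons c r' ih =>
      intro k e hdrop
      have hk : k < full.length := by
        by_contra hc
        rw [List.drop_eq_nil_of_le (by omega)] at hdrop
        exact absurd hdrop (by simp)
      have hck : full[k]'hk = c := by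
        have := List.drop_eq_getElem_cons hk
        rw [hdrop] at this
        exact (List.cons.injEq _ _ _ _ ▸ this).1.symm
      have hdrop' : full.drop (k + 1) = r' := by
        have h := congrArg (List.drop 1) hdrop
        rw [List.drop_drop] at h
        simpa [Nat.add_comm] using h
      by_cases hcd : '1' ≤ c ∧ c ≤ '9'
      · simp only [wwInd, if_pos hcd, okGo]
        have hchn : ((k : Int) + 1) = ((k + 1 : Nat) : Int) := by push_cast; ring
        have := main_lemma full r' (k+1) k hdrop' (by omega) hk (hck ▸ hcd)
        rw [hchn, this, hck]
        simp [eqCnt]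
      · simp only [wwInd, if_neg hcd, okGo]
        have hchn : ((k : Int) + 1) = ((k + 1 : Nat) : Int) := by push_cast; ring
        rw [hchn, ih (k+1) _ hdrop']

-- ===== VERDICT (by name: the statement is the Claim_ definition above) =====
theorem white_walkers_spec : Claim_equal_white_walkers := by
  intro village _
  unfold Spec_white_walkers white_walkers white_walkers_alt
  set cs := village.toList with hcs
  have hok := fold_ok cs none 0 0 true
  have hcnt := fold_cnt cs none 0 0 true
  have hA := main0 cs cs 0 0 rfl
  have hlen := wwInd_len cs 0
  simp only [Nat.cast_zero] at hA
  by_cases hfew : (wwInd cs 0).length < 2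
  · rw [if_pos hfew]
    show _ = ((cs.foldl wwStep (none, 0, 0, true)).2.2.2 && decide (2 ≤ (cs.foldl wwStep (none, 0, 0, true)).2.2.1))
    rw [hok, hcnt]
    have : ¬ (2 ≤ (0 : Int) + digCnt cs) := by rw [← hlen]; omega
    simp [this]
    intro _; omega
  · rw [if_neg hfew, hA]
    show _ = ((cs.foldl wwStep (none, 0, 0, true)).2.2.2 && decide (2 ≤ (cs.foldl wwStep (none, 0, 0, true)).2.2.1))
    rw [hok, hcnt]
    have : (2 ≤ (0 : Int) + digCnt cs) := by rw [← hlen]; omega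
    simp [this]
    intro _; omega
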